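-- pv_equiv track=rewrite | github.com/creativequotient/Rosalind | Bioinformatics_Stronghold/GRPH_Overlap_graphs.py | createPrefixMap
-- ===== SOURCE A (Python) =====
-- def createPrefixMap(fasta, k):
--     map = {}
--     for id, sequence in fasta.items():
--         prefix = sequence[:k]
--         if prefix in map:
--             map[prefix].append(id)
--         else:
--             map[prefix] = [id]
--     return map
-- ===== SOURCE B (Python) =====
-- def createPrefixMap(fasta, k):
--     items = list(fasta.items())
--     prefixes = []
--     for _, sequence in items:
--         p = sequence[:k]
--         if p not in prefixes:
--             prefixes.append(p)
--     return {p: [id for id, sequence in items if sequence[:k] == p] for p in prefixes}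
-- ===== Notes on version B (the rewrite author's own statement) =====
-- stated objective: alternative
-- what changed: B replaces A's single-pass incremental dict construction (lookup-and-append per item) with a two-phase pass: first collect the distinct prefixes in order of first occurrence, then build each group in one comprehension by filtering the whole item list per prefix.
import Mathlib
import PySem

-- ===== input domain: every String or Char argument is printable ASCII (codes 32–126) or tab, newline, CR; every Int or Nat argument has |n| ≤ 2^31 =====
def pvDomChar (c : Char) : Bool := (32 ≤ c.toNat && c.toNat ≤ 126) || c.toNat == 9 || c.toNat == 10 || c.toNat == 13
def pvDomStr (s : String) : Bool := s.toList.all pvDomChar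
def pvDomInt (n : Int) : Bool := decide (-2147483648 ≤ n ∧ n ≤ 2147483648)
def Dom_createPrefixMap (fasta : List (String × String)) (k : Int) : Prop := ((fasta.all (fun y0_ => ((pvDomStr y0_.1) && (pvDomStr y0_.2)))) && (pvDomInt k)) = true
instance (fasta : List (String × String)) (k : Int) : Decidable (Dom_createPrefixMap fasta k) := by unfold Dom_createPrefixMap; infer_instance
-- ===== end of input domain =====

-- B replaces A's incremental dict construction with a two-phase pass (collect distinct
-- prefixes in first-occurrence order, then one filter pass per pre); objective: alternative.

-- ===== PORT A =====
-- literal port of A: one pass, a dict accumulator, lookup-and-append or fresh singleton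
def createPrefixMap (fasta : List (String × String)) (k : Int) : List (String × List String) :=
  (fasta.foldl (fun m p =>
      let pre := PySem.Str.slice p.2 none (some k)
      if m.contains pre then
        m.insert pre (m.getD pre [] ++ [p.1])   -- map[pre].append(id)
      else
        m.insert pre [p.1]) PySem.Dict.empty).items

-- ===== PORT B =====
-- phase 1 of B: the distinct prefixes, in order of first occurrence
def cpmPrefixes (fasta : List (String × String)) (k : Int) : List String :=
  fasta.foldl (fun ps p =>
      let pre := PySem.Str.slice p.2 none (some k)
      if pre ∈ ps then ps else ps ++ [pre]) []

-- phase 2 of B: for each pre, the ids of the items carrying it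
def createPrefixMap_alt (fasta : List (String × String)) (k : Int) : List (String × List String) :=
  (cpmPrefixes fasta k).map (fun pre =>
    (pre, (fasta.filter (fun p => PySem.Str.slice p.2 none (some k) == pre)).map (·.1)))

-- ===== PRECONDITION & SPEC =====
def Spec_createPrefixMap (fasta : List (String × String)) (k : Int) (out : List (String × List String)) : Prop := out = createPrefixMap_alt fasta k
instance (fasta : List (String × String)) (k : Int) (out : List (String × List String)) : Decidable (Spec_createPrefixMap fasta k out) := by unfold Spec_createPrefixMap; infer_instance

-- ===== CLAIM (what is proved, stated in full; the proofs are below) =====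
def Claim_equal_createPrefixMap : Prop := ∀ (fasta : List (String × String)) (k : Int), Dom_createPrefixMap fasta k → Spec_createPrefixMap fasta k (createPrefixMap fasta k)

-- ===== LEMMAS AND PROOFS =====

-- A's loop body is exactly Dict.modify at the pre (modify k d0 f = insert k (f (getD k d0)))
theorem cpm_step_eq_modify (m : PySem.Dict String (List String)) (p : String × String) (k : Int) :
    (let pre := PySem.Str.slice p.2 none (some k)
     if m.contains pre then m.insert pre (m.getD pre [] ++ [p.1])
     else m.insert pre [p.1])
    = m.modify (PySem.Str.slice p.2 none (some k)) [] (· ++ [p.1]) := by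
  by_cases h : m.contains (PySem.Str.slice p.2 none (some k)) = true
  · simp [h, PySem.Dict.modify]
  · simp only [Bool.not_eq_true] at h
    simp only [h, Bool.false_eq_true, PySem.Dict.modify,
      PySem.Dict.getD_of_not_contains m [] h]
    simp

-- B's phase-1 loop is set(fasta items' prefixes) in first-occurrence order
theorem cpmPrefixes_eq_ofList (fasta : List (String × String)) (k : Int) :
    cpmPrefixes fasta k
      = PySem.Set.ofList (fasta.map (fun p => PySem.Str.slice p.2 none (some k))) := by
  rw [PySem.Set.ofList_eq_foldl, List.foldl_map]
  unfold cpmPrefixes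
  apply PySem.List.foldl_congr_mem
  intro acc x _
  simp [PySem.Set.add, PySem.Set.contains]

theorem createPrefixMap_spec' (fasta : List (String × String)) (k : Int) :
    createPrefixMap fasta k = createPrefixMap_alt fasta k := by
  unfold createPrefixMap
  have hstep :
      fasta.foldl (fun m p =>
          let pre := PySem.Str.slice p.2 none (some k)
          if m.contains pre then m.insert pre (m.getD pre [] ++ [p.1])
          else m.insert pre [p.1]) PySem.Dict.empty
        = (fasta.map (fun p => (PySem.Str.slice p.2 none (some k), p.1))).foldl
            (fun m q => m.modify q.1 [] (· ++ [q.2])) PySem.Dict.empty := by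
    rw [List.foldl_map]
    exact PySem.List.foldl_congr_mem _ _ _ _ (fun m p _ => cpm_step_eq_modify m p k)
  rw [hstep]
  set l := fasta.map (fun p => (PySem.Str.slice p.2 none (some k), p.1)) with hl
  set d := l.foldl (fun m q => m.modify q.1 [] (· ++ [q.2])) PySem.Dict.empty with hd
  have hkeys : d.keys = PySem.Set.ofList (l.map (·.1)) := by
    rw [hd, PySem.Dict.keys_foldl_modify_key (key := fun q : String × String => q.1)
      (f := fun (_ : PySem.Dict String (List String)) (q : String × String) => (· ++ [q.2]))]
    simp [PySem.Set.update, PySem.Set.ofList_eq_foldl]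
  have hnd : d.keys.Nodup := by rw [hkeys]; exact PySem.Set.nodup_ofList _
  rw [PySem.Dict.items_eq_map_keys d hnd []]
  unfold createPrefixMap_alt
  rw [cpmPrefixes_eq_ofList, hkeys]
  have hmapfst : l.map (·.1) = fasta.map (fun p => PySem.Str.slice p.2 none (some k)) := by
    rw [hl, List.map_map]; rfl
  rw [hmapfst]
  apply List.map_congr_left
  intro c _
  have hgetD : d.getD c [] = (l.filter (fun q => q.1 == c)).map (·.2) := by
    rw [hd]
    have := PySem.Dict.getD_foldl_modify_append (l := l) (d := PySem.Dict.empty) (c := c)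
    simpa using this
  rw [hgetD, hl, List.filter_map, List.map_map]
  rfl

-- ===== VERDICT (by name: the statement is the Claim_ definition above) =====
theorem createPrefixMap_spec : Claim_equal_createPrefixMap := by
  intro fasta k _
  unfold Spec_createPrefixMap
  exact createPrefixMap_spec' fasta k
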